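-- pv_equiv track=rewrite | github.com/lmb633/leetcode | 417pacificAtlantic.py | cicle
-- ===== SOURCE A (Python) =====
-- def cicle(matrix):
--     if not matrix:
--         return []
--     m = len(matrix)
--     n = len(matrix[0])
--     min_ = min(m, n)
--     k = 0
--     result = []
--     while min_ - 2 * k > 0:
--         for i in range(k, n - k):
--             result.append((k, i))
--         for i in range(k + 1, m - 1 - k):
--             result.append((i, n - 1 - k))
--         if m - 1 - k > k:
--             for i in range(n - 1 - k, k - 1, -1):
--                 result.append((m - 1 - k, i))
--         if n - 1 - k > k:
--             for i in range(m - 2 - k, k, -1):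
--                 result.append((i, k))
--         k += 1
--     return result
-- ===== SOURCE B (Python) =====
-- def cicle(matrix):
--     if not matrix:
--         return []
--     m, n = len(matrix), len(matrix[0])
--     result = []
--     r, c = 0, -1
--     dr, dc = 0, 1
--     lengths = [n, m - 1]
--     i = 0
--     while lengths[i % 2] > 0:
--         for _ in range(lengths[i % 2]):
--             r += dr
--             c += dc
--             result.append((r, c))
--         lengths[i % 2] -= 1
--         dr, dc = dc, -dr
--         i += 1
--     return result
-- ===== Notes on version B (the rewrite author's own statement) =====
-- stated objective: alternative
-- what changed: Replaced the layer-by-layer four-pass traversal by a single walking cursor with a rotating direction vector and two alternating segment lengths (n, m-1) that shrink after each segment, so there is one uniform inner loop instead of four directional passes with guards.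
import Mathlib
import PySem

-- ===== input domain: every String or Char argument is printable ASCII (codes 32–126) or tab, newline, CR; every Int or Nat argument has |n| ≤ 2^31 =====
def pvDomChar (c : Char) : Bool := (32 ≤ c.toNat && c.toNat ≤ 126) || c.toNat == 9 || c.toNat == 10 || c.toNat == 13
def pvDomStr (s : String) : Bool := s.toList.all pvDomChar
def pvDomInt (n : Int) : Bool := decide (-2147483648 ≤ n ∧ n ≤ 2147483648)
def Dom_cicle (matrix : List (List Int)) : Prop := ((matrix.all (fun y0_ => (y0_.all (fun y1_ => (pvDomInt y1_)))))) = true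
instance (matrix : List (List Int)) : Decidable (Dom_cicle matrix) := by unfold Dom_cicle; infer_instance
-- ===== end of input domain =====

-- B replaces A's layer-by-layer four-pass traversal with a single walking cursor, a rotating
-- direction vector and two alternating shrinking segment lengths (same cost).

-- ===== PORT A =====
-- the while-loop of A: state is the layer index k and the accumulated result
def cicleLoopA (m n : Int) (fuel : Nat) (k : Int) (acc : List (Int × Int)) : List (Int × Int) :=
  if min m n - 2 * k > 0 then
   match fuel with
   | 0 => acc  -- fuel bound, never reached from cicle's entry point
   | fuel + 1 =>
    let r1 := (PySem.List.pyRange k (n - k) 1).foldl (fun r i => r ++ [((k : Int), i)]) acc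
    let r2 := (PySem.List.pyRange (k + 1) (m - 1 - k) 1).foldl (fun r i => r ++ [(i, n - 1 - k)]) r1
    let r3 := if m - 1 - k > k then
        (PySem.List.pyRange (n - 1 - k) (k - 1) (-1)).foldl (fun r i => r ++ [(m - 1 - k, i)]) r2
      else r2
    let r4 := if n - 1 - k > k then
        (PySem.List.pyRange (m - 2 - k) k (-1)).foldl (fun r i => r ++ [(i, k)]) r3
      else r3
    cicleLoopA m n fuel (k + 1) r4
  else acc

def cicle (matrix : List (List Int)) : List (Int × Int) :=
  if matrix = [] then []
  else
    let m : Int := matrix.length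
    let n : Int := (matrix.headD []).length
    cicleLoopA m n (min m n).toNat 0 []

-- ===== PORT B =====
-- the while-loop of B: state is the segment index i, the two alternating lengths (la, lb),
-- the direction vector (dr, dc), the cursor (r, c) and the accumulated result;
-- the inner 'for _ in range(L)' is the foldl over pyRange 0 L 1 (the index is unused)
def cicleLoopB (fuel : Nat) (i : Nat) (la lb dr dc r c : Int) (acc : List (Int × Int)) :
    List (Int × Int) :=
  if 0 < (if i % 2 = 0 then la else lb) then
   match fuel with
   | 0 => acc  -- fuel bound, never reached from cicle_alt's entry point
   | fuel + 1 =>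
    let s := (PySem.List.pyRange 0 (if i % 2 = 0 then la else lb) 1).foldl
      (fun (st : Int × Int × List (Int × Int)) _ =>
        (st.1 + dr, st.2.1 + dc, st.2.2 ++ [(st.1 + dr, st.2.1 + dc)])) (r, c, acc)
    cicleLoopB fuel (i + 1)
      (if i % 2 = 0 then la - 1 else la) (if i % 2 = 0 then lb else lb - 1)
      dc (-dr) s.1 s.2.1 s.2.2
  else acc

def cicle_alt (matrix : List (List Int)) : List (Int × Int) :=
  if matrix = [] then []
  else
    cicleLoopB (2 * (matrix.length + (matrix.headD []).length) + 4) 0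
      ((matrix.headD []).length) ((matrix.length : Int) - 1) 0 1 0 (-1) []

-- ===== PRECONDITION & SPEC =====
def Spec_cicle (matrix : List (List Int)) (out : List (Int × Int)) : Prop := out = cicle_alt matrix
instance (matrix : List (List Int)) (out : List (Int × Int)) : Decidable (Spec_cicle matrix out) := by unfold Spec_cicle; infer_instance

-- ===== CLAIM (what is proved, stated in full; the proofs are below) =====
def Claim_equal_cicle : Prop := ∀ (matrix : List (List Int)), Dom_cicle matrix → Spec_cicle matrix (cicle matrix)

-- ===== LEMMAS AND PROOFS =====

-- cells emitted by one walk segment of length `len` in direction (dr, dc) starting at (r, c)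
def segOut (dr dc r c : Int) : Nat → List (Int × Int)
  | 0 => []
  | len + 1 => (r + dr, c + dc) :: segOut dr dc (r + dr) (c + dc) len

lemma foldl_walk (dr dc : Int) (l : List Int) : ∀ (r c : Int) (acc : List (Int × Int)),
    l.foldl (fun (st : Int × Int × List (Int × Int)) _ =>
        (st.1 + dr, st.2.1 + dc, st.2.2 ++ [(st.1 + dr, st.2.1 + dc)])) (r, c, acc)
      = (r + l.length * dr, c + l.length * dc, acc ++ segOut dr dc r c l.length) := by
  induction l with
  | nil => simp [segOut]
  | cons x xs ih =>
    intro r c acc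
    simp only [List.foldl_cons, List.length_cons, ih, segOut]
    refine Prod.ext (by push_cast; ring) (Prod.ext (by push_cast; ring) ?_)
    simp

lemma segOut_right (r : Int) (len : Nat) : ∀ (c : Int),
    segOut 0 1 r c len = (PySem.List.pyRange (c + 1) (c + 1 + len) 1).map (fun i => (r, i)) := by
  induction len with
  | zero => intro c; simp [segOut, PySem.List.pyRange_one_eq_nil]
  | succ len ih =>
    intro c
    rw [PySem.List.pyRange_one_cons (by push_cast; omega), List.map_cons]
    simp only [segOut, add_zero]
    rw [ih (c + 1)]
    congr 2
    push_cast; ring_nf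

lemma segOut_down (c : Int) (len : Nat) : ∀ (r : Int),
    segOut 1 0 r c len = (PySem.List.pyRange (r + 1) (r + 1 + len) 1).map (fun i => (i, c)) := by
  induction len with
  | zero => intro r; simp [segOut, PySem.List.pyRange_one_eq_nil]
  | succ len ih =>
    intro r
    rw [PySem.List.pyRange_one_cons (by push_cast; omega), List.map_cons]
    simp only [segOut, add_zero]
    rw [ih (r + 1)]
    congr 2
    push_cast; ring_nf

lemma segOut_left (r : Int) (len : Nat) : ∀ (c : Int),
    segOut 0 (-1) r c len = (PySem.List.pyRange (c - 1) (c - 1 - len) (-1)).map (fun i => (r, i)) := by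
  induction len with
  | zero => intro c; simp [segOut, PySem.List.pyRange_neg_one_eq_nil]
  | succ len ih =>
    intro c
    rw [PySem.List.pyRange_neg_one_cons (by push_cast; omega), List.map_cons]
    simp only [segOut, add_zero, ← sub_eq_add_neg]
    rw [ih (c - 1)]
    congr 2
    push_cast; ring_nf

lemma segOut_up (c : Int) (len : Nat) : ∀ (r : Int),
    segOut (-1) 0 r c len = (PySem.List.pyRange (r - 1) (r - 1 - len) (-1)).map (fun i => (i, c)) := by
  induction len with
  | zero => intro r; simp [segOut, PySem.List.pyRange_neg_one_eq_nil]
  | succ len ih =>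
    intro r
    rw [PySem.List.pyRange_neg_one_cons (by push_cast; omega), List.map_cons]
    simp only [segOut, add_zero, ← sub_eq_add_neg]
    rw [ih (r - 1)]
    congr 2
    push_cast; ring_nf

lemma foldl_app_map {α : Type} (l : List Int) (f : Int → α) (acc : List α) :
    l.foldl (fun r i => r ++ [f i]) acc = acc ++ l.map f := by
  induction l generalizing acc with
  | nil => simp
  | cons x xs ih => simp [List.foldl, ih]

-- one B segment, executed (guard holds)
lemma loopB_step (fuel : Nat) (i : Nat) (la lb dr dc r c : Int) (acc : List (Int × Int))
    (h : 0 < (if i % 2 = 0 then la else lb)) :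
    cicleLoopB (fuel + 1) i la lb dr dc r c acc =
    cicleLoopB fuel (i + 1)
      (if i % 2 = 0 then la - 1 else la) (if i % 2 = 0 then lb else lb - 1)
      dc (-dr)
      (r + (if i % 2 = 0 then la else lb) * dr) (c + (if i % 2 = 0 then la else lb) * dc)
      (acc ++ segOut dr dc r c (if i % 2 = 0 then la else lb).toNat) := by
  rw [cicleLoopB.eq_def, if_pos h]
  have hl : ((PySem.List.pyRange 0 (if i % 2 = 0 then la else lb) 1).length : Int)
      = (if i % 2 = 0 then la else lb) := by
    rw [PySem.List.length_pyRange_one]; omega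
  have hln : (PySem.List.pyRange 0 (if i % 2 = 0 then la else lb) 1).length
      = (if i % 2 = 0 then la else lb).toNat := by
    rw [PySem.List.length_pyRange_one]; omega
  simp only [foldl_walk, hln, Int.toNat_of_nonneg h.le]

-- B stops (guard fails)
lemma loopB_stop (fuel : Nat) (i : Nat) (la lb dr dc r c : Int) (acc : List (Int × Int))
    (h : ¬ 0 < (if i % 2 = 0 then la else lb)) :
    cicleLoopB fuel i la lb dr dc r c acc = acc := by
  rw [cicleLoopB.eq_def, if_neg h]

-- the four orientations of a B segment, with the rotation and cursor arithmetic normalized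
lemma stepR (fuel : Nat) (i : Nat) (la lb r c : Int) (acc : List (Int × Int))
    (h0 : i % 2 = 0) (h : 0 < la) :
    cicleLoopB (fuel + 1) i la lb 0 1 r c acc =
    cicleLoopB fuel (i + 1) (la - 1) lb 1 0 r (c + la) (acc ++ segOut 0 1 r c la.toNat) := by
  have := loopB_step fuel i la lb 0 1 r c acc (by rw [if_pos h0]; exact h)
  simpa [h0] using this

lemma stepD (fuel : Nat) (i : Nat) (la lb r c : Int) (acc : List (Int × Int))
    (h0 : i % 2 = 1) (h : 0 < lb) :
    cicleLoopB (fuel + 1) i la lb 1 0 r c acc =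
    cicleLoopB fuel (i + 1) la (lb - 1) 0 (-1) (r + lb) c (acc ++ segOut 1 0 r c lb.toNat) := by
  have := loopB_step fuel i la lb 1 0 r c acc (by rw [if_neg (by omega)]; exact h)
  simpa [h0] using this

lemma stepL (fuel : Nat) (i : Nat) (la lb r c : Int) (acc : List (Int × Int))
    (h0 : i % 2 = 0) (h : 0 < la) :
    cicleLoopB (fuel + 1) i la lb 0 (-1) r c acc =
    cicleLoopB fuel (i + 1) (la - 1) lb (-1) 0 r (c - la) (acc ++ segOut 0 (-1) r c la.toNat) := by
  have := loopB_step fuel i la lb 0 (-1) r c acc (by rw [if_pos h0]; exact h)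
  simpa [h0, sub_eq_add_neg, mul_comm] using this

lemma stepU (fuel : Nat) (i : Nat) (la lb r c : Int) (acc : List (Int × Int))
    (h0 : i % 2 = 1) (h : 0 < lb) :
    cicleLoopB (fuel + 1) i la lb (-1) 0 r c acc =
    cicleLoopB fuel (i + 1) la (lb - 1) 0 1 (r - lb) c (acc ++ segOut (-1) 0 r c lb.toNat) := by
  have := loopB_step fuel i la lb (-1) 0 r c acc (by rw [if_neg (by omega)]; exact h)
  simpa [h0, sub_eq_add_neg, mul_comm] using this

lemma stop_even (fuel : Nat) (i : Nat) (la lb dr dc r c : Int) (acc : List (Int × Int))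
    (h0 : i % 2 = 0) (h : ¬ 0 < la) :
    cicleLoopB fuel i la lb dr dc r c acc = acc :=
  loopB_stop fuel i la lb dr dc r c acc (by rw [if_pos h0]; exact h)

lemma stop_odd (fuel : Nat) (i : Nat) (la lb dr dc r c : Int) (acc : List (Int × Int))
    (h0 : i % 2 = 1) (h : ¬ 0 < lb) :
    cicleLoopB fuel i la lb dr dc r c acc = acc :=
  loopB_stop fuel i la lb dr dc r c acc (by rw [if_neg (by omega)]; exact h)

lemma loop_eq (m n : Int) : ∀ (fa : Nat) (fb : Nat) (i : Nat) (k : Int) (acc : List (Int × Int)),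
    i % 2 = 0 → 1 ≤ m - 2 * k → min m n - 2 * k ≤ 2 * fa → 4 * fa ≤ fb →
    cicleLoopA m n fa k acc =
      cicleLoopB fb i (n - 2 * k) (m - 1 - 2 * k) 0 1 k (k - 1) acc := by
  intro fa
  induction fa with
  | zero =>
    intro fb i k acc hi hm ha hb
    rw [cicleLoopA.eq_def, if_neg (by omega), stop_even _ _ _ _ _ _ _ _ _ hi (by omega)]
  | succ fa ih =>
    intro fb i k acc hi hm ha hb
    by_cases hg : 0 < n - 2 * k
    · obtain ⟨fb4, rfl⟩ : ∃ x, fb = x + 4 := ⟨fb - 4, by omega⟩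
      rw [cicleLoopA.eq_def, if_pos (by omega)]
      simp only [foldl_app_map]
      rw [show fb4 + 4 = (fb4 + 3) + 1 from rfl,
          stepR _ _ _ _ _ _ _ hi hg,
          show k - 1 + (n - 2 * k) = n - 1 - k by ring]
      by_cases hgd : 0 < m - 1 - 2 * k
      · rw [show fb4 + 3 = (fb4 + 2) + 1 from rfl,
            stepD _ _ _ _ _ _ _ (by omega) hgd,
            show k + (m - 1 - 2 * k) = m - 1 - k by ring]
        by_cases hgl : 0 < n - 2 * k - 1
        · rw [show fb4 + 2 = (fb4 + 1) + 1 from rfl,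
              stepL _ _ _ _ _ _ _ (by omega) hgl,
              show n - 1 - k - (n - 2 * k - 1) = k by ring]
          by_cases hgu : 0 < m - 1 - 2 * k - 1
          · -- full layer: all four segments run, recurse
            rw [show fb4 + 1 = fb4 + 1 from rfl,
                stepU _ _ _ _ _ _ _ (by omega) hgu,
                show m - 1 - k - (m - 1 - 2 * k - 1) = k + 1 by ring,
                if_pos (show m - 1 - k > k by omega), if_pos (show n - 1 - k > k by omega)]
            have e1 : (i + 4) % 2 = 0 := by omega
            have e2 : 1 ≤ m - 2 * (k + 1) := by omega
            have e3 : min m n - 2 * (k + 1) ≤ 2 * fa := by omega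
            have e4 : 4 * fa ≤ fb4 := by omega
            have ihh := fun acc => ih fb4 (i + 4) (k + 1) acc e1 e2 e3 e4
            simp only [show (k : Int) + 1 - 1 = k by ring] at ihh
            rw [ihh, show i + 1 + 1 + 1 + 1 = i + 4 from rfl,
                show n - 2 * k - 1 - 1 = n - 2 * (k + 1) by ring,
                show m - 1 - 2 * k - 1 - 1 = m - 1 - 2 * (k + 1) by ring]
            congr 1
            rw [segOut_right, segOut_down, segOut_left, segOut_up,
                Int.toNat_of_nonneg (show (0:Int) ≤ n - 2 * k by omega),
                Int.toNat_of_nonneg (show (0:Int) ≤ m - 1 - 2 * k by omega),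
                Int.toNat_of_nonneg (show (0:Int) ≤ n - 2 * k - 1 by omega),
                Int.toNat_of_nonneg (show (0:Int) ≤ m - 1 - 2 * k - 1 by omega)]
            rw [show (k:Int) - 1 + 1 = k by ring, show k + (n - 2 * k) = n - k by ring]
            rw [show k + 1 + (m - 1 - 2 * k) = (m - 1 - k) + 1 by ring,
                PySem.List.pyRange_one_succ_right (by omega), List.map_append]
            rw [show n - 1 - k - 1 - (n - 2 * k - 1) = k - 1 by ring,
                show n - 1 - k - 1 = n - 2 - k by ring]
            rw [show m - 1 - k - 1 - (m - 1 - 2 * k - 1) = k by ring,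
                show m - 1 - k - 1 = m - 2 - k by ring]
            rw [PySem.List.pyRange_neg_one_cons (show k - 1 < n - 1 - k by omega), List.map_cons,
                show n - 1 - k - 1 = n - 2 - k by ring]
            simp [List.append_assoc]
          · -- m = 2k+2: B stops before the up segment; A's left loop is empty
            rw [stop_odd _ _ _ _ _ _ _ _ _ (by omega) (by omega),
                if_pos (show m - 1 - k > k by omega), if_pos (show n - 1 - k > k by omega),
                PySem.List.pyRange_neg_one_eq_nil (show m - 2 - k ≤ k by omega)]
            rw [cicleLoopA.eq_def, if_neg (by omega)]
            simp only [List.map_nil, List.append_nil]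
            rw [segOut_right, segOut_down, segOut_left,
                Int.toNat_of_nonneg (show (0:Int) ≤ n - 2 * k by omega),
                Int.toNat_of_nonneg (show (0:Int) ≤ m - 1 - 2 * k by omega),
                Int.toNat_of_nonneg (show (0:Int) ≤ n - 2 * k - 1 by omega)]
            rw [show (k:Int) - 1 + 1 = k by ring, show k + (n - 2 * k) = n - k by ring]
            rw [show k + 1 + (m - 1 - 2 * k) = (m - 1 - k) + 1 by ring,
                PySem.List.pyRange_one_succ_right (by omega), List.map_append]
            rw [show n - 1 - k - 1 - (n - 2 * k - 1) = k - 1 by ring,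
                show n - 1 - k - 1 = n - 2 - k by ring]
            rw [PySem.List.pyRange_neg_one_cons (show k - 1 < n - 1 - k by omega), List.map_cons,
                show n - 1 - k - 1 = n - 2 - k by ring]
            simp [List.append_assoc]
        · -- n = 2k+1: B stops before the left segment; A's bottom loop is the single cell
          rw [stop_even _ _ _ _ _ _ _ _ _ (by omega) (by omega),
              if_pos (show m - 1 - k > k by omega), if_neg (show ¬ n - 1 - k > k by omega)]
          rw [cicleLoopA.eq_def, if_neg (by omega)]
          rw [segOut_right, segOut_down,
              Int.toNat_of_nonneg (show (0:Int) ≤ n - 2 * k by omega),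
              Int.toNat_of_nonneg (show (0:Int) ≤ m - 1 - 2 * k by omega)]
          rw [show (k:Int) - 1 + 1 = k by ring, show k + (n - 2 * k) = n - k by ring]
          rw [show k + 1 + (m - 1 - 2 * k) = (m - 1 - k) + 1 by ring,
              PySem.List.pyRange_one_succ_right (by omega), List.map_append]
          rw [PySem.List.pyRange_neg_one_cons (show k - 1 < n - 1 - k by omega),
              PySem.List.pyRange_neg_one_eq_nil (show n - 1 - k - 1 ≤ k - 1 by omega)]
          simp [List.append_assoc]
      · -- m = 2k+1: B stops after the top row; A's remaining loops are empty
        rw [stop_odd _ _ _ _ _ _ _ _ _ (by omega) (by omega),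
            if_neg (show ¬ m - 1 - k > k by omega),
            PySem.List.pyRange_one_eq_nil (show m - 1 - k ≤ k + 1 by omega),
            PySem.List.pyRange_neg_one_eq_nil (show m - 2 - k ≤ k by omega)]
        rw [cicleLoopA.eq_def, if_neg (by omega)]
        simp only [List.map_nil, List.append_nil, ite_self]
        rw [segOut_right, Int.toNat_of_nonneg (show (0:Int) ≤ n - 2 * k by omega),
            show (k:Int) - 1 + 1 = k by ring, show k + (n - 2 * k) = n - k by ring]
    · rw [cicleLoopA.eq_def, if_neg (by omega), stop_even _ _ _ _ _ _ _ _ _ hi (by omega)]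

-- ===== VERDICT (by name: the statement is the Claim_ definition above) =====
theorem cicle_spec : Claim_equal_cicle := by
  intro matrix _
  unfold Spec_cicle cicle cicle_alt
  split
  · rfl
  · rename_i hne
    have hm : 1 ≤ (matrix.length : Int) := by
      have : matrix.length ≠ 0 := fun h => hne (List.eq_nil_of_length_eq_zero h)
      omega
    simpa using loop_eq (matrix.length : Int) ((matrix.headD []).length : Int)
      ((min (matrix.length : Int) ((matrix.headD []).length : Int)).toNat)
      (2 * (matrix.length + (matrix.headD []).length) + 4) 0 0 [] rfl (by omega) (by omega)
      (by omega)
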